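-- pv_equiv track=rewrite | github.com/05Huang/FullScopeTest | backend/app/utils/ai_web_explorer.py | _select_input_target
-- ===== SOURCE A (Python) =====
-- from typing import Dict, Any, List, Optional, Callable
--
-- def _select_input_target(elements: List[Dict[str, Any]]) -> Optional[str]:
--     preferred_input_types = {"search", "text", "url", "email", "tel", ""}
--     for element in elements:
--         if element.get("tag") != "input":
--             continue
--         input_type = str(element.get("type") or "").lower()
--         if input_type in preferred_input_types:
--             return str(element.get("id") or "")
--     for element in elements:
--         if element.get("tag") == "textarea":
--             return str(element.get("id") or "")
--     return None
-- ===== SOURCE B (Python) =====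
-- from typing import Dict, Any, List, Optional
--
-- def _select_input_target(elements: List[Dict[str, Any]]) -> Optional[str]:
--     preferred_input_types = {"search", "text", "url", "email", "tel", ""}
--     textarea_id = None
--     for element in elements:
--         tag = element.get("tag")
--         if tag == "input":
--             if str(element.get("type") or "").lower() in preferred_input_types:
--                 return str(element.get("id") or "")
--         elif tag == "textarea" and textarea_id is None:
--             textarea_id = str(element.get("id") or "")
--     return textarea_id
-- ===== Notes on version B (the rewrite author's own statement) =====
-- stated objective: simpler
-- what changed: B replaces A's two sequential scans (inputs first, then textareas) by one single pass that returns a preferred input eagerly and remembers the first textarea id as a fallback.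
import Mathlib
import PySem

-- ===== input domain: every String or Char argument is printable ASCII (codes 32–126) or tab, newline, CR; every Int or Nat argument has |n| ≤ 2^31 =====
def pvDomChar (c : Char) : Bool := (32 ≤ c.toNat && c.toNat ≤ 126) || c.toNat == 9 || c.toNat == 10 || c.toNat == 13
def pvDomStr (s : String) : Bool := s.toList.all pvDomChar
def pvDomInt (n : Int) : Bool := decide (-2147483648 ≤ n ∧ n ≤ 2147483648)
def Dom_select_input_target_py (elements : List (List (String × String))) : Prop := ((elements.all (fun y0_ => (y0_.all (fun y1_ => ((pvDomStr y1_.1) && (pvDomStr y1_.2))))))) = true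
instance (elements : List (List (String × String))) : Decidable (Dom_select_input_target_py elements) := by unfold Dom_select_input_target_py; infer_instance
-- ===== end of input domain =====

-- B merges A's two sequential scans into one pass that returns a preferred input
-- eagerly and remembers the first textarea id as a fallback (objective: simpler).

-- ===== PORT A =====
-- element.get(k): first-match lookup in the association list (dict convention)
def pvGetKey (element : List (String × String)) (k : String) : Option String :=
  (element.find? (fun p => p.1 == k)).map (·.2)

-- str(element.get(k) or ""): None and "" both collapse to ""
def pvGetStr (element : List (String × String)) (k : String) : String :=
  (pvGetKey element k).getD ""

def pvPreferred : List String := ["search", "text", "url", "email", "tel", ""]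

-- first loop of A: first input element with a preferred type
def pvLoop1 : List (List (String × String)) → Option String
  | [] => none
  | element :: rest =>
    if pvGetKey element "tag" ≠ some "input" then pvLoop1 rest
    else if pvPreferred.contains (PySem.Str.lower (pvGetStr element "type")) then
      some (pvGetStr element "id")
    else pvLoop1 rest

-- second loop of A: first textarea element
def pvLoop2 : List (List (String × String)) → Option String
  | [] => none
  | element :: rest =>
    if pvGetKey element "tag" = some "textarea" then some (pvGetStr element "id")
    else pvLoop2 rest

def select_input_target_py (elements : List (List (String × String))) : Option String :=
  match pvLoop1 elements with
  | some r => some r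
  | none => pvLoop2 elements

-- ===== PORT B =====
-- single pass carrying the remembered textarea id (acc = textarea_id)
def pvGo : List (List (String × String)) → Option String → Option String
  | [], acc => acc
  | element :: rest, acc =>
    let tag := pvGetKey element "tag"
    if tag = some "input" then
      if pvPreferred.contains (PySem.Str.lower (pvGetStr element "type")) then
        some (pvGetStr element "id")
      else pvGo rest acc
    else if tag = some "textarea" ∧ acc = none then
      pvGo rest (some (pvGetStr element "id"))
    else pvGo rest acc

def select_input_target_py_alt (elements : List (List (String × String))) : Option String :=
  pvGo elements none

-- ===== PRECONDITION & SPEC =====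
def Spec_select_input_target_py (elements : List (List (String × String))) (out : Option String) : Prop := out = select_input_target_py_alt elements
instance (elements : List (List (String × String))) (out : Option String) : Decidable (Spec_select_input_target_py elements out) := by unfold Spec_select_input_target_py; infer_instance

-- ===== CLAIM (what is proved, stated in full; the proofs are below) =====
def Claim_equal_select_input_target_py : Prop := ∀ (elements : List (List (String × String))), Dom_select_input_target_py elements → Spec_select_input_target_py elements (select_input_target_py elements)

-- ===== LEMMAS AND PROOFS =====

-- invariant of B's single pass: the remembered textarea id is consulted only
-- after the preferred-input search and before the rest's textarea search
theorem pvGo_eq (l : List (List (String × String))) (acc : Option String) :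
    pvGo l acc =
      match pvLoop1 l with
      | some r => some r
      | none => match acc with
        | some a => some a
        | none => pvLoop2 l := by
  induction l generalizing acc with
  | nil => cases acc <;> simp [pvGo, pvLoop1, pvLoop2]
  | cons e rest ih =>
    by_cases hin : pvGetKey e "tag" = some "input"
    · by_cases hp : PySem.Str.lower (pvGetStr e "type") ∈ pvPreferred
      · simp [pvGo, pvLoop1, hin, hp]
      · have hta : pvGetKey e "tag" ≠ some "textarea" := by simp [hin]
        simp [pvGo, pvLoop1, pvLoop2, hin, hp, hta, ih]
    · by_cases hta : pvGetKey e "tag" = some "textarea"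
      · cases acc with
        | none => simp [pvGo, pvLoop1, pvLoop2, hta, ih]
        | some a => simp [pvGo, pvLoop1, pvLoop2, hta, ih]
      · simp [pvGo, pvLoop1, pvLoop2, hin, hta, ih]

-- ===== VERDICT (by name: the statement is the Claim_ definition above) =====
theorem select_input_target_py_spec : Claim_equal_select_input_target_py := by
  intro elements _
  unfold Spec_select_input_target_py select_input_target_py select_input_target_py_alt
  rw [pvGo_eq]
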